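-- pv_equiv track=rewrite | github.com/FmJarecki/TournamentApp | TournamentApp/src/trophy_stage_screen.py | reorder_teams
-- ===== SOURCE A (Python) =====
-- def reorder_teams(teams):
--     real_teams = [team for team in teams if team != '-']
--     byes = [team for team in teams if team == '-']
--
--     reordered = []
--     i = 0
--     while i < len(real_teams) or i < len(byes):
--         if i < len(real_teams):
--             reordered.append(real_teams[i])
--         if i < len(byes):
--             reordered.append(byes[i])
--         i += 1
--     return reordered
-- ===== SOURCE B (Python) =====
-- def reorder_teams(teams):
--     # All byes are the identical string '-', so never build a bye list:
--     # one pass counts dashes and collects real teams, then a closed-form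
--     # slice at m = min(len(real), k) produces the interleaved head and the tail.
--     real = []
--     k = 0
--     for t in teams:
--         if t == '-':
--             k += 1
--         else:
--             real.append(t)
--     m = min(len(real), k)
--     out = [x for t in real[:m] for x in (t, '-')]
--     out += real[m:]
--     out += ['-'] * (k - m)
--     return out
-- ===== Notes on version B (the rewrite author's own statement) =====
-- stated objective: alternative
-- what changed: B never materialises the bye list: a single pass counts the '-' entries and collects real teams, then the result is built in closed form by pairing the first min(len(real), count) reals each with a dash and appending the leftover reals or leftover dashes.
import Mathlib
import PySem

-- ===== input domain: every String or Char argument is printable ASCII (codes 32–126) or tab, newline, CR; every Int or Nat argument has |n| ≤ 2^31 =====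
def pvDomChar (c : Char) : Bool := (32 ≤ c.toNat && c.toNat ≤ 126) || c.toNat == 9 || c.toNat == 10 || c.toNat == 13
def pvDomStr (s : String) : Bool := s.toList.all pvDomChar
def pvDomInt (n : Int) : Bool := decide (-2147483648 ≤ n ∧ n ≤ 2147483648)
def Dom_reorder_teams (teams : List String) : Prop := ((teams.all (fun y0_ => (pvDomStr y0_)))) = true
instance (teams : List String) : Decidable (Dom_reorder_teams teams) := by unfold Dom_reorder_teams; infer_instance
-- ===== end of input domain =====

-- B never builds the bye list: one pass counts '-' and collects real teams, then a closed-form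
-- slice at m = min(len(real), k) yields the interleaved head and the leftover tail (alternative).

-- ===== PORT A =====
-- the while loop: i counts up while i < len(real_teams) or i < len(byes)
def reorderLoopA (real_teams byes : List String) (reordered : List String) (i : Nat) : List String :=
  if i < real_teams.length ∨ i < byes.length then
    let reordered := if h : i < real_teams.length then reordered ++ [real_teams[i]] else reordered
    let reordered := if h : i < byes.length then reordered ++ [byes[i]] else reordered
    reorderLoopA real_teams byes reordered (i + 1)
  else reordered
termination_by (real_teams.length + byes.length) - i
decreasing_by omega

def reorder_teams (teams : List String) : List String :=
  let real_teams := teams.filter (fun team => team ≠ "-")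
  let byes := teams.filter (fun team => team = "-")
  reorderLoopA real_teams byes [] 0

-- ===== PORT B =====
-- the single pass: collect real teams, count dashes
def collectB (teams : List String) (real : List String) (k : Nat) : List String × Nat :=
  match teams with
  | [] => (real, k)
  | t :: ts => if t = "-" then collectB ts real (k + 1) else collectB ts (real ++ [t]) k

def reorder_teams_alt (teams : List String) : List String :=
  let (real, k) := collectB teams [] 0
  let m := min real.length k
  ((real.take m).flatMap (fun t => [t, "-"])) ++ real.drop m ++ List.replicate (k - m) "-"

-- ===== PRECONDITION & SPEC =====
def Spec_reorder_teams (teams : List String) (out : List String) : Prop := out = reorder_teams_alt teams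
instance (teams : List String) (out : List String) : Decidable (Spec_reorder_teams teams out) := by unfold Spec_reorder_teams; infer_instance

-- ===== CLAIM (what is proved, stated in full; the proofs are below) =====
def Claim_equal_reorder_teams : Prop := ∀ (teams : List String), Dom_reorder_teams teams → Spec_reorder_teams teams (reorder_teams teams)

-- ===== LEMMAS AND PROOFS =====

-- A's interleave, in direct recursive form
def interA (xs ys : List String) : List String :=
  match xs, ys with
  | [], ys => ys
  | x :: xs, [] => x :: interA xs []
  | x :: xs, y :: ys => x :: y :: interA xs ys

theorem loopA_eq_interA (xs ys acc : List String) (i : Nat) :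
    reorderLoopA xs ys acc i = acc ++ interA (xs.drop i) (ys.drop i) := by
  by_cases h : i < xs.length ∨ i < ys.length
  · rw [reorderLoopA, if_pos h]
    rw [loopA_eq_interA xs ys _ (i + 1)]
    by_cases hx : i < xs.length <;> by_cases hy : i < ys.length
    · rw [dif_pos hx, dif_pos hy,
        List.drop_eq_getElem_cons hx, List.drop_eq_getElem_cons hy]
      simp [interA]
    · rw [dif_pos hx, dif_neg hy,
        List.drop_eq_getElem_cons hx, List.drop_eq_nil_of_le (by omega : ys.length ≤ i),
        List.drop_eq_nil_of_le (by omega : ys.length ≤ i + 1)]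
      simp [interA]
    · rw [dif_neg hx, dif_pos hy,
        List.drop_eq_getElem_cons hy, List.drop_eq_nil_of_le (by omega : xs.length ≤ i),
        List.drop_eq_nil_of_le (by omega : xs.length ≤ i + 1)]
      simp [interA]
    · omega
  · rw [reorderLoopA, if_neg h]
    rw [List.drop_eq_nil_of_le (by omega : xs.length ≤ i),
        List.drop_eq_nil_of_le (by omega : ys.length ≤ i)]
    simp [interA]
termination_by (xs.length + ys.length) - i
decreasing_by omega

theorem collectB_spec (teams real : List String) (k : Nat) :
    collectB teams real k =
      (real ++ teams.filter (fun t => t ≠ "-"), k + (teams.filter (fun t => t = "-")).length) := by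
  induction teams generalizing real k with
  | nil => simp [collectB]
  | cons t ts ih =>
    by_cases h : t = "-"
    · simp [collectB, h, ih, List.filter]
      omega
    · simp [collectB, h, ih, List.filter]

theorem interA_nil (xs : List String) : interA xs [] = xs := by
  induction xs with
  | nil => rfl
  | cons x xs ih => simp [interA, ih]

-- interleaving with a list of k dashes equals B's closed form
theorem interA_replicate (xs : List String) (k : Nat) :
    interA xs (List.replicate k "-") =
      ((xs.take (min xs.length k)).flatMap (fun t => [t, "-"])) ++
        xs.drop (min xs.length k) ++ List.replicate (k - min xs.length k) "-" := by
  induction xs generalizing k with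
  | nil => simp [interA]
  | cons x xs ih =>
    cases k with
    | zero =>
      simp only [Nat.min_zero, List.take_zero, List.drop_zero, Nat.zero_sub,
        List.replicate_zero, List.flatMap_nil, List.nil_append, List.append_nil]
      exact interA_nil _
    | succ k =>
      have hm : min (x :: xs).length (k + 1) = min xs.length k + 1 := by
        simp only [List.length_cons]; omega
      rw [hm, List.replicate_succ]
      simp only [interA, List.take_succ_cons, List.drop_succ_cons, List.flatMap_cons, ih]
      simp

theorem filter_eq_replicate (teams : List String) :
    teams.filter (fun t => t = "-") =
      List.replicate (teams.filter (fun t => t = "-")).length "-" := by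
  induction teams with
  | nil => simp
  | cons t ts ih =>
    by_cases h : t = "-"
    · simp only [List.filter_cons, h, decide_true, if_true, List.length_cons, List.replicate_succ]
      exact congrArg _ ih
    · simp only [List.filter_cons, h, decide_false, Bool.false_eq_true, if_false]
      exact ih

-- ===== VERDICT (by name: the statement is the Claim_ definition above) =====
theorem reorder_teams_spec : Claim_equal_reorder_teams := by
  intro teams _
  unfold Spec_reorder_teams reorder_teams reorder_teams_alt
  rw [collectB_spec]
  simp only [List.nil_append, Nat.zero_add]
  rw [loopA_eq_interA]
  simp only [List.drop_zero, List.nil_append]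
  conv_lhs => rw [filter_eq_replicate]
  exact interA_replicate _ _
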